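-- pv_equiv track=rewrite | github.com/selfapplied/redoxa | src/demos/chess_gray8.py | rook_step
-- ===== SOURCE A (Python) =====
-- def gray3(n: int) -> tuple[int,int,int]:
--     assert 0 <= n < 8
--     g = n ^ (n >> 1)
--     return (g & 1, (g >> 1) & 1, (g >> 2) & 1)  # (b0,b1,b2)
--
-- def inv_gray3(bits: tuple[int,int,int]) -> int:
--     g = bits[0] | (bits[1] << 1) | (bits[2] << 2)
--     b = 0
--     while g:
--         b ^= g
--         g >>= 1
--     return b  # 0..7
--
-- def pack_byte(file_idx: int, rank_idx: int, beta: int, kappa: int) -> int: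
--     f0,f1,f2 = gray3(file_idx)
--     r0,r1,r2 = gray3(rank_idx)
--     return (f0
--             | (f1 << 1) | (f2 << 2)
--             | (r0 << 3) | (r1 << 4) | (r2 << 5)
--             | (beta << 6) | (kappa << 7))  # 0..255
--
-- def unpack_byte(u8: int):
--     fbits = (u8 & 1, (u8>>1)&1, (u8>>2)&1)
--     rbits = ((u8>>3)&1, (u8>>4)&1, (u8>>5)&1)
--     beta  = (u8>>6) & 1
--     kappa = (u8>>7) & 1
--     f = inv_gray3(fbits); r = inv_gray3(rbits)
--     return f, r, beta, kappa, fbits, rbits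
--
-- def rook_step(u8: int, axis='file', which_bit=0, sign=+1) -> int:
--     f, r, beta, kappa, fbits, rbits = unpack_byte(u8)
--     if axis == 'file':
--         fbits = tuple(b ^ (1 if t==which_bit else 0) for t,b in enumerate(fbits))
--     else:
--         rbits = tuple(b ^ (1 if t==which_bit else 0) for t,b in enumerate(rbits))
--     i2 = inv_gray3(fbits); j2 = inv_gray3(rbits)
--     return pack_byte(i2, j2, beta, kappa)
-- ===== SOURCE B (Python) =====
-- def rook_step(u8: int, axis='file', which_bit=0, sign=+1) -> int:
--     # Gray encode/decode round-trips cancel: the whole unpack/toggle/repack is just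
--     # toggling one bit of the low byte.
--     pos = which_bit if axis == 'file' else 3 + which_bit
--     mask = (1 << pos) if 0 <= which_bit < 3 else 0
--     return (u8 ^ mask) & 0xFF
-- ===== Notes on version B (the rewrite author's own statement) =====
-- stated objective: simpler
-- what changed: B drops the unpack / Gray-decode / toggle / Gray-encode / repack pipeline entirely: since Gray encode and decode cancel, the whole function is a single one-line toggle of one bit of the low byte, (u8 ^ mask) & 0xFF.
import Mathlib
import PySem

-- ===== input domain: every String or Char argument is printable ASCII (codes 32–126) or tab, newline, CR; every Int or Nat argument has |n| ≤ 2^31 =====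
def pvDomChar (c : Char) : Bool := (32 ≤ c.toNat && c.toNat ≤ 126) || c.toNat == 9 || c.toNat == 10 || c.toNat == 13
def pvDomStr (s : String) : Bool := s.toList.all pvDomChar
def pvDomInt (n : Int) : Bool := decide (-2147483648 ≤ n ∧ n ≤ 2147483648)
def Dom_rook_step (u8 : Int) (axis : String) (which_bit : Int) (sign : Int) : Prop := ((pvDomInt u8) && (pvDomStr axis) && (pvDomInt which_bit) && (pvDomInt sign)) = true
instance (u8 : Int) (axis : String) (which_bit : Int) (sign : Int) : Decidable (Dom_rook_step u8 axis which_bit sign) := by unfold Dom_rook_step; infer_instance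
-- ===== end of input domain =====

-- B replaces A's unpack / Gray-decode / toggle / Gray-encode / repack pipeline by a single
-- closed-form bit toggle on the low byte (objective: simpler).

-- ===== PORT A =====
-- gray3: the Python assert 0 <= n < 8 never fires here (every call site passes an
-- inv_gray3 result of 0/1 bits, which is 0..7), so the port omits it.
def gray3 (n : Int) : Int × Int × Int :=
  let g := PySem.Int.bxor n (n >>> (1 : Nat))
  (PySem.Int.band g 1, PySem.Int.band (g >>> (1 : Nat)) 1, PySem.Int.band (g >>> (2 : Nat)) 1)

-- 'b = 0; while g: b ^= g; g >>= 1' — g strictly halves, so g.toNat steps of fuel are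
-- enough for every nonnegative g (all call sites build g from 0/1 bits, so g is 0..7;
-- Python would not terminate on negative g, which no call site produces).
def invGray3Loop (fuel : Nat) (b g : Int) : Int :=
  match fuel with
  | 0 => b
  | fuel + 1 => if 0 < g then invGray3Loop fuel (PySem.Int.bxor b g) (g >>> (1 : Nat)) else b

def inv_gray3 (bits : Int × Int × Int) : Int :=
  let g := PySem.Int.bor bits.1 (PySem.Int.bor (bits.2.1 <<< (1 : Nat)) (bits.2.2 <<< (2 : Nat)))
  invGray3Loop g.toNat 0 g

def pack_byte (file_idx rank_idx beta kappa : Int) : Int :=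
  let f := gray3 file_idx
  let r := gray3 rank_idx
  PySem.Int.bor f.1 (PySem.Int.bor (f.2.1 <<< (1 : Nat)) (PySem.Int.bor (f.2.2 <<< (2 : Nat))
    (PySem.Int.bor (r.1 <<< (3 : Nat)) (PySem.Int.bor (r.2.1 <<< (4 : Nat)) (PySem.Int.bor (r.2.2 <<< (5 : Nat))
    (PySem.Int.bor (beta <<< (6 : Nat)) (kappa <<< (7 : Nat))))))))

def unpack_byte (u8 : Int) :
    Int × Int × Int × Int × (Int × Int × Int) × (Int × Int × Int) :=
  let fbits := (PySem.Int.band u8 1, PySem.Int.band (u8 >>> (1 : Nat)) 1, PySem.Int.band (u8 >>> (2 : Nat)) 1)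
  let rbits := (PySem.Int.band (u8 >>> (3 : Nat)) 1, PySem.Int.band (u8 >>> (4 : Nat)) 1, PySem.Int.band (u8 >>> (5 : Nat)) 1)
  let beta := PySem.Int.band (u8 >>> (6 : Nat)) 1
  let kappa := PySem.Int.band (u8 >>> (7 : Nat)) 1
  let f := inv_gray3 fbits
  let r := inv_gray3 rbits
  (f, r, beta, kappa, fbits, rbits)

def rook_step (u8 : Int) (axis : String) (which_bit : Int) (sign : Int) : Int :=
  let up := unpack_byte u8
  let beta := up.2.2.1
  let kappa := up.2.2.2.1
  let fbits := up.2.2.2.2.1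
  let rbits := up.2.2.2.2.2
  -- the tuple-comprehension toggle, unrolled over the 3-tuple (t = 0, 1, 2)
  let fbits' := if axis == "file" then
      (PySem.Int.bxor fbits.1 (if (0 : Int) = which_bit then 1 else 0),
       PySem.Int.bxor fbits.2.1 (if (1 : Int) = which_bit then 1 else 0),
       PySem.Int.bxor fbits.2.2 (if (2 : Int) = which_bit then 1 else 0))
    else fbits
  let rbits' := if axis == "file" then rbits
    else
      (PySem.Int.bxor rbits.1 (if (0 : Int) = which_bit then 1 else 0),
       PySem.Int.bxor rbits.2.1 (if (1 : Int) = which_bit then 1 else 0),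
       PySem.Int.bxor rbits.2.2 (if (2 : Int) = which_bit then 1 else 0))
  let i2 := inv_gray3 fbits'
  let j2 := inv_gray3 rbits'
  pack_byte i2 j2 beta kappa

-- ===== PORT B =====
def rook_step_alt (u8 : Int) (axis : String) (which_bit : Int) (sign : Int) : Int :=
  let pos : Int := if axis == "file" then which_bit else 3 + which_bit
  let mask : Int := if 0 ≤ which_bit ∧ which_bit < 3 then (1 : Int) <<< pos.toNat else 0
  PySem.Int.band (PySem.Int.bxor u8 mask) 255

-- ===== PRECONDITION & SPEC =====
def Spec_rook_step (u8 : Int) (axis : String) (which_bit : Int) (sign : Int) (out : Int) : Prop := out = rook_step_alt u8 axis which_bit sign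
instance (u8 : Int) (axis : String) (which_bit : Int) (sign : Int) (out : Int) : Decidable (Spec_rook_step u8 axis which_bit sign out) := by unfold Spec_rook_step; infer_instance

-- ===== CLAIM (what is proved, stated in full; the proofs are below) =====
def Claim_equal_rook_step : Prop := ∀ (u8 : Int) (axis : String) (which_bit : Int) (sign : Int), Dom_rook_step u8 axis which_bit sign → Spec_rook_step u8 axis which_bit sign (rook_step u8 axis which_bit sign)

-- ===== LEMMAS AND PROOFS =====

-- A's bit reads are unchanged by first reducing the byte mod 256.
theorem bit_mod256 (a : Int) (k : Nat) (hk : k < 8) :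
    PySem.Int.band ((a % 256) >>> k) 1 = PySem.Int.band (a >>> k) 1 := by
  rw [PySem.Int.band_one, PySem.Int.band_one, Int.shiftRight_eq_div_pow,
    Int.shiftRight_eq_div_pow, PySem.Int.mod_eq_emod_of_pos (by omega),
    PySem.Int.mod_eq_emod_of_pos (by omega)]
  interval_cases k <;> omega

theorem bit0_mod256 (a : Int) :
    PySem.Int.band (a % 256) 1 = PySem.Int.band a 1 := by
  rw [PySem.Int.band_one, PySem.Int.band_one,
    PySem.Int.mod_eq_emod_of_pos (by omega), PySem.Int.mod_eq_emod_of_pos (by omega)]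
  omega

theorem unpack_mod256 (u8 : Int) : unpack_byte (u8 % 256) = unpack_byte u8 := by
  simp only [unpack_byte]
  rw [bit0_mod256, bit_mod256 _ 1 (by omega), bit_mod256 _ 2 (by omega),
    bit_mod256 _ 3 (by omega), bit_mod256 _ 4 (by omega), bit_mod256 _ 5 (by omega),
    bit_mod256 _ 6 (by omega), bit_mod256 _ 7 (by omega)]

theorem A_mod256 (u8 : Int) (axis : String) (wb s : Int) :
    rook_step (u8 % 256) axis wb s = rook_step u8 axis wb s := by
  simp only [rook_step, unpack_mod256]

-- Nat: xor then the low-byte mask only sees the left argument mod 256.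
theorem xor_mod256 (N m : Nat) : ((N % 256) ^^^ m) % 256 = (N ^^^ m) % 256 := by
  apply Nat.eq_of_testBit_eq
  intro i
  rw [show (256 : Nat) = 2 ^ 8 from rfl]
  simp only [Nat.testBit_mod_two_pow, Nat.testBit_xor]
  by_cases h : i < 8 <;> simp [h]

theorem and255_eq_mod (x : Nat) : x &&& 255 = x % 256 := by
  have := Nat.and_two_pow_sub_one_eq_mod x 8
  norm_num at this
  omega

set_option maxRecDepth 8192 in
theorem sub255_eq_xor (z : Nat) (h : z < 256) : 255 - z = 255 ^^^ z := by
  have : ∀ v : Fin 256, 255 - v.val = 255 ^^^ v.val := by decide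
  exact this ⟨z, h⟩

theorem xor_lt_256 (x y : Nat) (hx : x < 256) (hy : y < 256) : x ^^^ y < 256 := by
  have h28 : (2 : Nat) ^ 8 = 256 := by norm_num
  have := Nat.xor_lt_two_pow (n := 8) (by rw [h28]; exact hx) (by rw [h28]; exact hy)
  rwa [h28] at this

theorem band_neg255 (K : Nat) :
    PySem.Int.band (-(K : Int) - 1) 255 = ((255 - (255 &&& K) : Nat) : Int) := by
  rw [PySem.Int.band]
  simp only [if_neg (by omega : ¬ (0 : Int) ≤ -(K : Int) - 1),
    if_pos (by norm_num : (0 : Int) ≤ 255)]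
  rw [show (-(-(K : Int) - 1) - 1).toNat = K by omega, show (255 : Int).toNat = 255 from rfl]

theorem bxor_band255_mod (a m : Int) (hm0 : 0 ≤ m) (hm : m < 256) :
    PySem.Int.band (PySem.Int.bxor (a % 256) m) 255 = PySem.Int.band (PySem.Int.bxor a m) 255 := by
  have hr0 : 0 ≤ a % 256 := Int.emod_nonneg a (by omega)
  have hr1 : a % 256 < 256 := Int.emod_lt_of_pos a (by omega)
  have hm' : m.toNat < 256 := by omega
  by_cases ha : 0 ≤ a
  · -- a ≥ 0: everything stays in Nat
    rw [PySem.Int.bxor_of_nonneg hr0 hm0, PySem.Int.bxor_of_nonneg ha hm0,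
      PySem.Int.band_of_nonneg (by positivity) (by norm_num),
      PySem.Int.band_of_nonneg (by positivity) (by norm_num)]
    have hA : (a % 256).toNat = a.toNat % 256 := by omega
    simp only [Int.toNat_natCast, show (255 : Int).toNat = 255 from rfl, and255_eq_mod, hA,
      xor_mod256]
  · -- a < 0: the two's-complement case of bxor/band
    set N : Nat := (-a - 1).toNat with hN
    have hLHS : PySem.Int.bxor a m = -((N ^^^ m.toNat : Nat) : Int) - 1 := by
      rw [PySem.Int.bxor]
      simp only [if_neg (by omega : ¬ (0 : Int) ≤ a), if_pos hm0]
      rw [hN]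
    rw [PySem.Int.bxor_of_nonneg hr0 hm0,
      PySem.Int.band_of_nonneg (by positivity) (by norm_num), hLHS, band_neg255]
    simp only [Int.toNat_natCast, show (255 : Int).toNat = 255 from rfl]
    congr 1
    have hA : (a % 256).toNat = 255 - N % 256 := by omega
    rw [hA, and255_eq_mod, Nat.and_comm 255 (N ^^^ m.toNat), and255_eq_mod,
      ← xor_mod256 N m.toNat,
      Nat.mod_eq_of_lt (xor_lt_256 _ _ (by omega) (by omega)),
      sub255_eq_xor (N % 256) (by omega), Nat.xor_assoc,
      Nat.mod_eq_of_lt (xor_lt_256 (N % 256) m.toNat (by omega) (by omega)),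
      ← sub255_eq_xor _ (xor_lt_256 (N % 256) m.toNat (by omega) (by omega))]

theorem B_mod256 (u8 : Int) (axis : String) (wb s : Int) :
    rook_step_alt (u8 % 256) axis wb s = rook_step_alt u8 axis wb s := by
  simp only [rook_step_alt]
  apply bxor_band255_mod
  · split_ifs with h h'
    · obtain ⟨hl, hr⟩ := h
      interval_cases wb <;> decide
    · obtain ⟨hl, hr⟩ := h
      interval_cases wb <;> decide
    · omega
  · split_ifs with h h'
    · obtain ⟨hl, hr⟩ := h
      interval_cases wb <;> decide
    · obtain ⟨hl, hr⟩ := h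
      interval_cases wb <;> decide
    · omega

-- neither port reads 'sign'
theorem A_sign (u8 : Int) (ax : String) (wb s : Int) :
    rook_step u8 ax wb s = rook_step u8 ax wb 0 := rfl
theorem B_sign (u8 : Int) (ax : String) (wb s : Int) :
    rook_step_alt u8 ax wb s = rook_step_alt u8 ax wb 0 := rfl

-- both ports read 'axis' only through the test axis == "file"
theorem A_axis_file (u8 : Int) (ax : String) (wb s : Int) (h : (ax == "file") = true) :
    rook_step u8 ax wb s = rook_step u8 "file" wb s := by
  simp [rook_step, h]
theorem A_axis_rank (u8 : Int) (ax : String) (wb s : Int) (h : (ax == "file") = false) :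
    rook_step u8 ax wb s = rook_step u8 "rank" wb s := by
  simp [rook_step, h]
theorem B_axis_file (u8 : Int) (ax : String) (wb s : Int) (h : (ax == "file") = true) :
    rook_step_alt u8 ax wb s = rook_step_alt u8 "file" wb s := by
  simp [rook_step_alt, h]
theorem B_axis_rank (u8 : Int) (ax : String) (wb s : Int) (h : (ax == "file") = false) :
    rook_step_alt u8 ax wb s = rook_step_alt u8 "rank" wb s := by
  simp [rook_step_alt, h]

-- out-of-range which_bit: both ports toggle nothing, like which_bit = 5
theorem A_wb_out (u8 : Int) (ax : String) (wb s : Int)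
    (h0 : ¬ (0 : Int) = wb) (h1 : ¬ (1 : Int) = wb) (h2 : ¬ (2 : Int) = wb) :
    rook_step u8 ax wb s = rook_step u8 ax 5 s := by
  simp [rook_step, h0, h1, h2]
theorem B_wb_out (u8 : Int) (ax : String) (wb s : Int) (h : ¬ (0 ≤ wb ∧ wb < 3)) :
    rook_step_alt u8 ax wb s = rook_step_alt u8 ax 5 s := by
  simp [rook_step_alt, h]

-- the byte-level core: one decidable check per (axis-branch, which_bit-class)
set_option maxHeartbeats 1000000 in
set_option maxRecDepth 100000 in
theorem core_f0 : ∀ v : Fin 256, rook_step (v.val : Int) "file" 0 0 = rook_step_alt (v.val : Int) "file" 0 0 := by decide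
set_option maxHeartbeats 1000000 in
set_option maxRecDepth 100000 in
theorem core_f1 : ∀ v : Fin 256, rook_step (v.val : Int) "file" 1 0 = rook_step_alt (v.val : Int) "file" 1 0 := by decide
set_option maxHeartbeats 1000000 in
set_option maxRecDepth 100000 in
theorem core_f2 : ∀ v : Fin 256, rook_step (v.val : Int) "file" 2 0 = rook_step_alt (v.val : Int) "file" 2 0 := by decide
set_option maxHeartbeats 1000000 in
set_option maxRecDepth 100000 in
theorem core_f5 : ∀ v : Fin 256, rook_step (v.val : Int) "file" 5 0 = rook_step_alt (v.val : Int) "file" 5 0 := by decide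
set_option maxHeartbeats 1000000 in
set_option maxRecDepth 100000 in
theorem core_r0 : ∀ v : Fin 256, rook_step (v.val : Int) "rank" 0 0 = rook_step_alt (v.val : Int) "rank" 0 0 := by decide
set_option maxHeartbeats 1000000 in
set_option maxRecDepth 100000 in
theorem core_r1 : ∀ v : Fin 256, rook_step (v.val : Int) "rank" 1 0 = rook_step_alt (v.val : Int) "rank" 1 0 := by decide
set_option maxHeartbeats 1000000 in
set_option maxRecDepth 100000 in
theorem core_r2 : ∀ v : Fin 256, rook_step (v.val : Int) "rank" 2 0 = rook_step_alt (v.val : Int) "rank" 2 0 := by decide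
set_option maxHeartbeats 1000000 in
set_option maxRecDepth 100000 in
theorem core_r5 : ∀ v : Fin 256, rook_step (v.val : Int) "rank" 5 0 = rook_step_alt (v.val : Int) "rank" 5 0 := by decide

theorem core_case (r : Int) (h0 : 0 ≤ r) (h1 : r < 256) (ax : String) (wb : Int)
    (hax : ax = "file" ∨ ax = "rank") (hwb : wb = 0 ∨ wb = 1 ∨ wb = 2 ∨ wb = 5) :
    rook_step r ax wb 0 = rook_step_alt r ax wb 0 := by
  have hv : ((⟨r.toNat, by omega⟩ : Fin 256).val : Int) = r := by
    simp [Int.toNat_of_nonneg h0]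
  rcases hax with h | h <;> subst h <;> rcases hwb with h | h | h | h <;> subst h
  · exact hv ▸ core_f0 ⟨r.toNat, by omega⟩
  · exact hv ▸ core_f1 ⟨r.toNat, by omega⟩
  · exact hv ▸ core_f2 ⟨r.toNat, by omega⟩
  · exact hv ▸ core_f5 ⟨r.toNat, by omega⟩
  · exact hv ▸ core_r0 ⟨r.toNat, by omega⟩
  · exact hv ▸ core_r1 ⟨r.toNat, by omega⟩
  · exact hv ▸ core_r2 ⟨r.toNat, by omega⟩
  · exact hv ▸ core_r5 ⟨r.toNat, by omega⟩

-- ===== VERDICT (by name: the statement is the Claim_ definition above) =====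
theorem rook_step_spec : Claim_equal_rook_step := by
  intro u8 ax wb s _
  unfold Spec_rook_step
  rw [← A_mod256 u8 ax wb s, ← B_mod256 u8 ax wb s,
    A_sign (u8 % 256) ax wb s, B_sign (u8 % 256) ax wb s]
  have h0 : 0 ≤ u8 % 256 := Int.emod_nonneg u8 (by omega)
  have h1 : u8 % 256 < 256 := Int.emod_lt_of_pos u8 (by omega)
  rcases Bool.eq_false_or_eq_true (ax == "file") with hax | hax
  · rw [A_axis_file _ _ _ _ hax, B_axis_file _ _ _ _ hax]
    by_cases hw0 : (0 : Int) = wb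
    · exact hw0 ▸ core_case _ h0 h1 _ _ (Or.inl rfl) (Or.inl rfl)
    · by_cases hw1 : (1 : Int) = wb
      · exact hw1 ▸ core_case _ h0 h1 _ _ (Or.inl rfl) (Or.inr (Or.inl rfl))
      · by_cases hw2 : (2 : Int) = wb
        · exact hw2 ▸ core_case _ h0 h1 _ _ (Or.inl rfl) (Or.inr (Or.inr (Or.inl rfl)))
        · rw [A_wb_out _ _ _ _ hw0 hw1 hw2, B_wb_out _ _ _ _ (by omega)]
          exact core_case _ h0 h1 _ _ (Or.inl rfl) (Or.inr (Or.inr (Or.inr rfl)))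
  · rw [A_axis_rank _ _ _ _ hax, B_axis_rank _ _ _ _ hax]
    by_cases hw0 : (0 : Int) = wb
    · exact hw0 ▸ core_case _ h0 h1 _ _ (Or.inr rfl) (Or.inl rfl)
    · by_cases hw1 : (1 : Int) = wb
      · exact hw1 ▸ core_case _ h0 h1 _ _ (Or.inr rfl) (Or.inr (Or.inl rfl))
      · by_cases hw2 : (2 : Int) = wb
        · exact hw2 ▸ core_case _ h0 h1 _ _ (Or.inr rfl) (Or.inr (Or.inr (Or.inl rfl)))
        · rw [A_wb_out _ _ _ _ hw0 hw1 hw2, B_wb_out _ _ _ _ (by omega)]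
          exact core_case _ h0 h1 _ _ (Or.inr rfl) (Or.inr (Or.inr (Or.inr rfl)))
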